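-- pv_equiv track=rewrite | github.com/SeongcheolJeong/Radar-Simulation | scripts/run_avx_export_benchmark_matrix.py | _aggregate_counts
-- ===== SOURCE A (Python) =====
-- from typing import Any, Dict, List, Mapping, Optional, Sequence
--
-- def _aggregate_counts(rows: Sequence[Mapping[str, Any]]) -> Dict[str, int]:
--     status_ready = 0
--     physics_better = 0
--     physics_equivalent = 0
--     physics_worse = 0
--     function_better = 0
--     function_equivalent = 0
--     function_worse = 0
--
--     for row in rows:
--         if str(row.get("comparison_status", "")) == "ready":
--             status_ready += 1
--
--         physics_claim = str(row.get("physics_claim", ""))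
--         if physics_claim == "candidate_better_vs_truth":
--             physics_better += 1
--         elif physics_claim == "candidate_worse_vs_truth":
--             physics_worse += 1
--         elif physics_claim == "equivalent_vs_truth":
--             physics_equivalent += 1
--
--         function_claim = str(row.get("function_claim", ""))
--         if function_claim == "candidate_better":
--             function_better += 1
--         elif function_claim == "candidate_worse":
--             function_worse += 1
--         elif function_claim == "equivalent":
--             function_equivalent += 1
--
--     return {
--         "total_profiles": int(len(rows)),
--         "ready_count": int(status_ready),
--         "physics_better_count": int(physics_better),
--         "physics_equivalent_count": int(physics_equivalent),
--         "physics_worse_count": int(physics_worse),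
--         "function_better_count": int(function_better),
--         "function_equivalent_count": int(function_equivalent),
--         "function_worse_count": int(function_worse),
--     }
-- ===== SOURCE B (Python) =====
-- from collections import Counter
-- from typing import Any, Dict, Mapping, Sequence
--
--
-- def _aggregate_counts(rows: Sequence[Mapping[str, Any]]) -> Dict[str, int]:
--     status = Counter(str(r.get("comparison_status", "")) for r in rows)
--     physics = Counter(str(r.get("physics_claim", "")) for r in rows)
--     function = Counter(str(r.get("function_claim", "")) for r in rows)
--     return {
--         "total_profiles": len(rows),
--         "ready_count": status["ready"],
--         "physics_better_count": physics["candidate_better_vs_truth"],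
--         "physics_equivalent_count": physics["equivalent_vs_truth"],
--         "physics_worse_count": physics["candidate_worse_vs_truth"],
--         "function_better_count": function["candidate_better"],
--         "function_equivalent_count": function["equivalent"],
--         "function_worse_count": function["candidate_worse"],
--     }
-- ===== Notes on version B (the rewrite author's own statement) =====
-- stated objective: idiomatic
-- what changed: Replaced the single loop with seven manually maintained counters and if/elif chains by three collections.Counter tabulations (one per field) that are then indexed for the wanted keys, removing all branches.
import Mathlib
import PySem

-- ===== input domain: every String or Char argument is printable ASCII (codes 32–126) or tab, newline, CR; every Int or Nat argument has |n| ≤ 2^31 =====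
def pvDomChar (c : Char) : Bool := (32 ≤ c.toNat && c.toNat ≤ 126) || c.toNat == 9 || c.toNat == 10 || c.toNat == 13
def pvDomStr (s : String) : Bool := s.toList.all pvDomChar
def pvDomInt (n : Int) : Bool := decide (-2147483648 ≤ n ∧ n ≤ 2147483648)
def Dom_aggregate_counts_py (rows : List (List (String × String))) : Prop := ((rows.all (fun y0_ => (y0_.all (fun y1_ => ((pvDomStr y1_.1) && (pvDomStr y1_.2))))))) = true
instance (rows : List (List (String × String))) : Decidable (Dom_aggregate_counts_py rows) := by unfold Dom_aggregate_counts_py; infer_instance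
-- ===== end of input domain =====

set_option maxHeartbeats 1000000


-- B replaces A's single loop with seven branch-maintained tallies by three Counter tabulations indexed for the wanted keys (idiomatic).

-- ===== PORT A =====
-- row.get(k, "") : first-match lookup in the association list (Dict.get? scans in order)
def pvRowGet (row : List (String × String)) (k : String) : String :=
  (PySem.Dict.mk row).getD k ""

def pvAggStep (st : Int × Int × Int × Int × Int × Int × Int) (row : List (String × String)) :
    Int × Int × Int × Int × Int × Int × Int :=
  let (sr, pb, pe, pw, fb, fe, fw) := st
  let sr := if pvRowGet row "comparison_status" == "ready" then sr + 1 else sr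
  let pc := pvRowGet row "physics_claim"
  let (pb, pw, pe) :=
    if pc == "candidate_better_vs_truth" then (pb + 1, pw, pe)
    else if pc == "candidate_worse_vs_truth" then (pb, pw + 1, pe)
    else if pc == "equivalent_vs_truth" then (pb, pw, pe + 1)
    else (pb, pw, pe)
  let fc := pvRowGet row "function_claim"
  let (fb, fw, fe) :=
    if fc == "candidate_better" then (fb + 1, fw, fe)
    else if fc == "candidate_worse" then (fb, fw + 1, fe)
    else if fc == "equivalent" then (fb, fw, fe + 1)
    else (fb, fw, fe)
  (sr, pb, pe, pw, fb, fe, fw)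

def aggregate_counts_py (rows : List (List (String × String))) : List (String × Int) :=
  let st := rows.foldl pvAggStep (0, 0, 0, 0, 0, 0, 0)
  let (sr, pb, pe, pw, fb, fe, fw) := st
  [("total_profiles", (rows.length : Int)),
   ("ready_count", sr),
   ("physics_better_count", pb),
   ("physics_equivalent_count", pe),
   ("physics_worse_count", pw),
   ("function_better_count", fb),
   ("function_equivalent_count", fe),
   ("function_worse_count", fw)]

-- ===== PORT B =====
def aggregate_counts_py_alt (rows : List (List (String × String))) : List (String × Int) :=
  let status := PySem.Dict.counter (rows.map (fun r => pvRowGet r "comparison_status"))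
  let physics := PySem.Dict.counter (rows.map (fun r => pvRowGet r "physics_claim"))
  let function := PySem.Dict.counter (rows.map (fun r => pvRowGet r "function_claim"))
  [("total_profiles", (rows.length : Int)),
   ("ready_count", status.getD "ready" 0),
   ("physics_better_count", physics.getD "candidate_better_vs_truth" 0),
   ("physics_equivalent_count", physics.getD "equivalent_vs_truth" 0),
   ("physics_worse_count", physics.getD "candidate_worse_vs_truth" 0),
   ("function_better_count", function.getD "candidate_better" 0),
   ("function_equivalent_count", function.getD "equivalent" 0),
   ("function_worse_count", function.getD "candidate_worse" 0)]

-- ===== PRECONDITION & SPEC =====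
def Spec_aggregate_counts_py (rows : List (List (String × String))) (out : List (String × Int)) : Prop := out = aggregate_counts_py_alt rows
instance (rows : List (List (String × String))) (out : List (String × Int)) : Decidable (Spec_aggregate_counts_py rows out) := by unfold Spec_aggregate_counts_py; infer_instance

-- ===== CLAIM (what is proved, stated in full; the proofs are below) =====
def Claim_equal_aggregate_counts_py : Prop := ∀ (rows : List (List (String × String))), Dom_aggregate_counts_py rows → Spec_aggregate_counts_py rows (aggregate_counts_py rows)

-- ===== LEMMAS AND PROOFS =====
theorem pvAggLoop_eq (rows : List (List (String × String)))
    (sr pb pe pw fb fe fw : Int) :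
    rows.foldl pvAggStep (sr, pb, pe, pw, fb, fe, fw) =
      (sr + ((rows.map (fun r => pvRowGet r "comparison_status")).count "ready" : Int),
       pb + ((rows.map (fun r => pvRowGet r "physics_claim")).count "candidate_better_vs_truth" : Int),
       pe + ((rows.map (fun r => pvRowGet r "physics_claim")).count "equivalent_vs_truth" : Int),
       pw + ((rows.map (fun r => pvRowGet r "physics_claim")).count "candidate_worse_vs_truth" : Int),
       fb + ((rows.map (fun r => pvRowGet r "function_claim")).count "candidate_better" : Int),
       fe + ((rows.map (fun r => pvRowGet r "function_claim")).count "equivalent" : Int),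
       fw + ((rows.map (fun r => pvRowGet r "function_claim")).count "candidate_worse" : Int)) := by
  induction rows generalizing sr pb pe pw fb fe fw with
  | nil => simp
  | cons r rest ih =>
    simp only [List.foldl_cons, List.map_cons, List.count_cons, pvAggStep]
    rw [ih]
    split_ifs <;> simp_all [Prod.ext_iff] <;> omega

theorem aggregate_counts_py_spec : Claim_equal_aggregate_counts_py := by
  intro rows _
  show aggregate_counts_py rows = aggregate_counts_py_alt rows
  simp only [aggregate_counts_py, aggregate_counts_py_alt, pvAggLoop_eq,
    PySem.Dict.getD_counter]
  simp
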